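-- pv_equiv track=rewrite | github.com/Creohex/leetcode | problems/848.py | solve
-- ===== SOURCE A (Python) =====
-- def solve(s: str, shifts: list[int]) -> str:
--     res = []
--     start = ord("a")
--     end = ord("z") + 1
--     alphabet_len = 26
--
--     def shift(c, steps):
--         return chr((((ord(c) + steps) - end) % alphabet_len) + start)
--
--     step_accumulator = 0
--     for i in reversed(range(len(shifts))):
--         step_accumulator += shifts[i]
--         res.insert(0, shift(s[i], step_accumulator))
--
--     return "".join(res)
-- ===== SOURCE B (Python) =====
-- def solve(s: str, shifts: list[int]) -> str:
--     total = sum(shifts)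
--     prefix = []
--     acc = 0
--     for x in shifts:
--         prefix.append(acc)
--         acc += x
--     return "".join(
--         chr((((ord(s[i]) + total - prefix[i]) - 123) % 26) + 97)
--         for i in range(len(shifts))
--     )
-- ===== Notes on version B (the rewrite author's own statement) =====
-- stated objective: faster
-- what changed: Replaces A's single fused reverse loop that accumulates the suffix sum and prepends each shifted char with res.insert(0, ...) (quadratic) by two separate forward passes: first materialize the prefix-sum table of shifts, then a comprehension that applies the shift formula with total-minus-prefix and joins once.
import Mathlib
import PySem

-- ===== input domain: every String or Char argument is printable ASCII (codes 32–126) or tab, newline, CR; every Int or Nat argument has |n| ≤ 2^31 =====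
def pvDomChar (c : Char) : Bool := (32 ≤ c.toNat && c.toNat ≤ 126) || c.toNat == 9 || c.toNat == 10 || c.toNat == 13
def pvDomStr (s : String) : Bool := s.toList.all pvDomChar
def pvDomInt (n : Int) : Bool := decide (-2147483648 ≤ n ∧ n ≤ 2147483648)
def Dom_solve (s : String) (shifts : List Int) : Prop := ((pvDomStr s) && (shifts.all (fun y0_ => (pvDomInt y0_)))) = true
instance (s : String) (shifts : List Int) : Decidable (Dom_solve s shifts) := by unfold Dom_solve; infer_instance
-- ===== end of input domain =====

-- B replaces A's fused reverse loop with res.insert(0, ...) (quadratic) by two forward passes: a prefix-sum table, then a comprehension using total minus prefix; return values proved equal wherever A returns.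

-- ===== PORT A =====
def pvShiftA (c : Char) (steps : Int) : Char :=
  Char.ofNat ((((c.toNat : Int) + steps - 123).emod 26 + 97).toNat)

def pvStepA (s : String) (shifts : List Int) (st : List Char × Int) (i : Int) : List Char × Int :=
  let acc := st.2 + PySem.List.pyGetD shifts i 0
  match PySem.Str.pyGet? s i with
  | some c => (pvShiftA c acc :: st.1, acc)
  | none => (st.1, acc)

def solve (s : String) (shifts : List Int) : String :=
  let st := ((PySem.List.pyRange 0 shifts.length 1).reverse).foldl (pvStepA s shifts) ([], 0)
  String.ofList st.1

-- ===== PORT B =====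
def solve_alt (s : String) (shifts : List Int) : String :=
  let total := shifts.foldl (· + ·) 0
  let pfx := (shifts.foldl (fun (st : List Int × Int) x => (st.1 ++ [st.2], st.2 + x)) ([], 0)).1
  String.ofList ((PySem.List.pyRange 0 shifts.length 1).filterMap (fun i =>
    (PySem.Str.pyGet? s i).map (fun c =>
      Char.ofNat ((((c.toNat : Int) + total - PySem.List.pyGetD pfx i 0 - 123).emod 26 + 97).toNat))))

-- ===== PRECONDITION & SPEC =====
-- Pre_ excludes inputs with more shifts than characters: there A's s[i] raises IndexError (and B raises identically).
def Pre_solve (s : String) (shifts : List Int) : Prop := shifts.length ≤ s.toList.length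
instance (s : String) (shifts : List Int) : Decidable (Pre_solve s shifts) := by unfold Pre_solve; infer_instance
def pvWitness_solve : String × List Int := ("abc", [3, 5, 9])

def Spec_solve (s : String) (shifts : List Int) (out : String) : Prop := out = solve_alt s shifts
instance (s : String) (shifts : List Int) (out : String) : Decidable (Spec_solve s shifts out) := by unfold Spec_solve; infer_instance

-- ===== CLAIM (what is proved, stated in full; the proofs are below) =====
def Claim_equal_solve : Prop := ∀ (s : String) (shifts : List Int), Dom_solve s shifts → Pre_solve s shifts → Spec_solve s shifts (solve s shifts)

-- ===== LEMMAS AND PROOFS =====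

-- A's reverse loop: result list is the map of suffix-partial-sums over the processed prefix.
lemma loopA_inv (s : String) (shifts : List Int) (i : Nat)
    (hi : i ≤ shifts.length) (hlen : shifts.length ≤ s.toList.length)
    (res₀ : List Char) (acc₀ : Int) :
    (((List.range i).map (fun (k : Nat) => (k : Int))).reverse).foldl (pvStepA s shifts) (res₀, acc₀)
    = ((List.range i).map (fun j => pvShiftA (s.toList[j]!) (acc₀ + ((shifts.take i).drop j).sum)) ++ res₀,
       acc₀ + (shifts.take i).sum) := by
  induction i generalizing res₀ acc₀ with
  | zero => simp
  | succ i ih =>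
    have hi' : i < shifts.length := hi
    have his : i < s.toList.length := lt_of_lt_of_le hi' hlen
    rw [List.range_succ, List.map_append, List.reverse_append]
    simp only [List.map_cons, List.map_nil, List.reverse_cons, List.reverse_nil, List.nil_append,
      List.singleton_append, List.foldl_cons]
    have hstep : pvStepA s shifts (res₀, acc₀) (i : Int)
        = (pvShiftA (s.toList[i]!) (acc₀ + shifts[i]) :: res₀, acc₀ + shifts[i]) := by
      unfold pvStepA
      rw [PySem.Str.pyGet?_natCast, List.getElem?_eq_getElem his, PySem.List.pyGetD_natCast,
        List.getD_eq_getElem shifts 0 hi']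
      simp [List.getElem!_eq_getElem?_getD, List.getElem?_eq_getElem his]
    rw [hstep, ih (le_of_lt hi')]
    simp only [Prod.mk.injEq]
    refine ⟨?_, ?_⟩
    · have htk : List.take (i+1) shifts = List.take i shifts ++ [shifts[i]] := by
        rw [List.take_add_one, List.getElem?_eq_getElem hi']
        rfl
      rw [List.map_append, List.append_assoc, List.map_cons, List.map_nil, List.singleton_append]
      congr 1
      · refine List.map_congr_left ?_
        intro j hj
        have hji : j < i := List.mem_range.mp hj
        congr 1
        rw [htk, List.drop_append_of_le_length (by simp [List.length_take]; omega), List.sum_append]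
        simp
        ring
      · congr 2
        rw [htk, List.drop_append_of_le_length (by simp [List.length_take]; omega)]
        simp
    · rw [List.sum_take_succ _ _ hi']
      ring

-- B's first pass: the prefix table is the list of prefix sums of shifts.
lemma prefixB_inv (sh : List Int) (l₀ : List Int) (acc₀ : Int) :
    sh.foldl (fun (st : List Int × Int) x => (st.1 ++ [st.2], st.2 + x)) (l₀, acc₀)
    = (l₀ ++ (List.range sh.length).map (fun j => acc₀ + (sh.take j).sum), acc₀ + sh.sum) := by
  induction sh generalizing l₀ acc₀ with
  | nil => simp
  | cons x rest ih =>
    simp only [List.foldl_cons, ih]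
    simp only [List.length_cons, Prod.mk.injEq]
    refine ⟨?_, by simp; ring⟩
    rw [List.range_succ_eq_map, List.map_cons, List.map_map, List.append_assoc]
    simp only [List.take_zero, List.sum_nil, add_zero, List.singleton_append]
    congr 2
    refine List.map_congr_left ?_
    intro j _
    simp [List.sum_cons]
    ring

-- ===== VERDICT (by name: the statement is the Claim_ definition above) =====
theorem solve_spec : Claim_equal_solve := by
  intro s shifts _ hpre
  unfold Pre_solve at hpre
  unfold Spec_solve solve solve_alt
  have hr : PySem.List.pyRange 0 shifts.length 1 = (List.range shifts.length).map (fun (k : Nat) => (k : Int)) := by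
    rw [PySem.List.pyRange_one]
    simp
  have htot : shifts.foldl (· + ·) 0 = shifts.sum := List.sum_eq_foldl.symm
  rw [hr, htot, prefixB_inv shifts [] 0]
  simp only [List.nil_append]
  rw [loopA_inv s shifts shifts.length le_rfl hpre [] 0]
  simp only [List.take_length, List.append_nil]
  congr 1
  rw [List.filterMap_map]
  have hmap : ∀ j ∈ List.range shifts.length,
      ((fun i => (PySem.Str.pyGet? s i).map (fun c =>
        Char.ofNat ((((c.toNat : Int) + shifts.sum -
          PySem.List.pyGetD ((List.range shifts.length).map (fun j => 0 + (shifts.take j).sum)) i 0 - 123).emod 26 + 97).toNat))) ∘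
        (fun (k : Nat) => (k : Int))) j
      = some (pvShiftA (s.toList[j]!) (0 + ((shifts).drop j).sum)) := by
    intro j hj
    have hjn : j < shifts.length := List.mem_range.mp hj
    have hjs : j < s.toList.length := lt_of_lt_of_le hjn hpre
    simp only [Function.comp_apply]
    rw [PySem.Str.pyGet?_natCast, List.getElem?_eq_getElem hjs, PySem.List.pyGetD_natCast]
    simp only [Option.map_some]
    congr 1
    unfold pvShiftA
    rw [List.getD_eq_getElem _ 0 (by simpa using hjn)]
    simp only [List.getElem_map, List.getElem_range, zero_add]
    have hsplit : shifts.sum = (List.take j shifts).sum + (List.drop j shifts).sum := by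
      conv_lhs => rw [← List.take_append_drop j shifts]
      rw [List.sum_append]
    rw [show s.toList[j]! = s.toList[j] from by
      simp [List.getElem!_eq_getElem?_getD, List.getElem?_eq_getElem hjs]]
    rw [show (((s.toList[j].toNat : Int)) + shifts.sum - (List.take j shifts).sum - 123)
        = (((s.toList[j].toNat : Int)) + (List.drop j shifts).sum - 123) from by omega]
  rw [List.filterMap_congr hmap,
    show (fun j => some (pvShiftA (s.toList[j]!) (0 + (shifts.drop j).sum)))
      = some ∘ (fun j => pvShiftA (s.toList[j]!) (0 + (shifts.drop j).sum)) from rfl,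
    List.filterMap_eq_map]
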